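-- pv_equiv track=rewrite | github.com/hun23/Daily-Algorithm | ALGO/2NUMBER/10859_뒤집어진소수.py | upside_down
-- ===== SOURCE A (Python) =====
-- def upside_down(num):
--     pair = [0, 1, 2, -1, -1, 5, 9, -1, 8, 6]
--     ret = 0
--     degree = len(str(num)) - 1
--     while num > 0:
--         changed = pair[num%10]
--         if changed == -1:
--             return 0
--         ret += changed * (10**degree)
--         degree -= 1
--         num //= 10
--     return ret
-- ===== SOURCE B (Python) =====
-- def upside_down(num):
--     mapping = {'0': 0, '1': 1, '2': 2, '5': 5, '6': 9, '8': 8, '9': 6}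
--     s = str(num)
--     if any(c not in mapping for c in s):
--         return 0
--     ret = 0
--     for c in reversed(s):
--         ret = ret * 10 + mapping[c]
--     return ret
-- ===== Notes on version B (the rewrite author's own statement) =====
-- stated objective: idiomatic
-- what changed: Replaced A's fused arithmetic digit loop (10**degree positional powers, len(str(num)) bookkeeping, sentinel list with -1 and early return mid-accumulation) by a string pipeline: a separate validation pass of str(num) against a char->digit dict, then a Horner fold over the reversed string.
import Mathlib
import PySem

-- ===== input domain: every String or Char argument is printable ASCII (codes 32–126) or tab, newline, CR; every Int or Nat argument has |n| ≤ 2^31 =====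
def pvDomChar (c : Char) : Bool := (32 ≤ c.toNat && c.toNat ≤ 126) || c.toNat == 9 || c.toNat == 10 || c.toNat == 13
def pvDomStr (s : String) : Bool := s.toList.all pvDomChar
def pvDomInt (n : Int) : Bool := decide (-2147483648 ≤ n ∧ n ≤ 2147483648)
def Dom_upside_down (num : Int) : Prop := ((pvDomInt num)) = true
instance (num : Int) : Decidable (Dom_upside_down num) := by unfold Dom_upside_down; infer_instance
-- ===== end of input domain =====

-- B replaces A's fused arithmetic loop (powers of 10 via len(str(num)) and a sentinel list)
-- by a string pipeline: a validation pass over str(num) against a digit→digit dict, then a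
-- Horner fold over the reversed string (objective: idiomatic; not faster).

-- ===== PORT A =====
def pairA : List Int := [0, 1, 2, -1, -1, 5, 9, -1, 8, 6]

def upsideLoop (num ret degree : Int) : Int :=
  if _h : 0 < num then
    match PySem.List.pyGet? pairA (PySem.Int.mod num 10) with
    | none => 0  -- unreachable: 0 ≤ num % 10 < 10 = len(pair), so pair[num%10] never raises
    | some changed =>
      if changed = -1 then 0
      else
        -- 10**degree: degree ≥ 0 at every use (len(str(num))-1 down to 0), so ^ on Nat is exact
        upsideLoop (PySem.Int.floordiv num 10) (ret + changed * 10 ^ degree.toNat) (degree - 1)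
  else ret
termination_by num.toNat
decreasing_by
  have h10 : PySem.Int.floordiv num 10 = num / 10 :=
    PySem.Int.floordiv_eq_ediv_of_pos (by norm_num)
  rw [h10]; omega

def upside_down (num : Int) : Int :=
  upsideLoop num 0 (PySem.Str.len (PySem.Int.toStr num) - 1)

-- ===== PORT B =====
def udMapping : PySem.Dict Char Int :=
  PySem.Dict.ofList [('0', 0), ('1', 1), ('2', 2), ('5', 5), ('6', 9), ('8', 8), ('9', 6)]

def upside_down_alt (num : Int) : Int :=
  let cs := (PySem.Int.toStr num).toList
  if cs.any (fun c => !(udMapping.contains c)) then 0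
  else
    -- mapping[c] ported as getD c 0: this branch runs only when every c is a key
    cs.reverse.foldl (fun ret c => ret * 10 + udMapping.getD c 0) 0

-- ===== PRECONDITION & SPEC =====
def Spec_upside_down (num : Int) (out : Int) : Prop := out = upside_down_alt num
instance (num : Int) (out : Int) : Decidable (Spec_upside_down num out) := by unfold Spec_upside_down; infer_instance

-- ===== CLAIM (what is proved, stated in full; the proofs are below) =====
def Claim_equal_upside_down : Prop := ∀ (num : Int), Dom_upside_down num → Spec_upside_down num (upside_down num)

-- ===== LEMMAS AND PROOFS =====

-- the digit map A encodes in pairA (and B in udMapping), as a function on Nat digits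
def mapD (d : Nat) : Int :=
  match d with
  | 0 => 0 | 1 => 1 | 2 => 2 | 5 => 5 | 6 => 9 | 8 => 8 | 9 => 6 | _ => -1

lemma pyGet?_pairA (d : Nat) (hd : d < 10) :
    PySem.List.pyGet? pairA ((d : Nat) : Int) = some (mapD d) := by
  interval_cases d <;> decide

lemma contains_digitChar (d : Nat) (hd : d < 10) :
    (!(udMapping.contains (Nat.digitChar d))) = decide (mapD d = -1) := by
  interval_cases d <;> decide

lemma getD_digitChar (d : Nat) (hd : d < 10) (hv : mapD d ≠ -1) :
    udMapping.getD (Nat.digitChar d) 0 = mapD d := by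
  interval_cases d <;> first | decide | exact absurd rfl hv

lemma any_congr_mem {α : Type} (l : List α) (p q : α → Bool)
    (h : ∀ x ∈ l, p x = q x) : l.any p = l.any q := by
  induction l with
  | nil => rfl
  | cons a t ih =>
    simp only [List.any_cons, h a (List.mem_cons_self), ih fun x hx => h x (List.mem_cons_of_mem a hx)]

lemma foldl_horner_shift (ds : List Nat) (a : Int) :
    ds.foldl (fun x d => x * 10 + mapD d) a
      = a * 10 ^ ds.length + ds.foldl (fun x d => x * 10 + mapD d) 0 := by
  induction ds generalizing a with
  | nil => simp
  | cons d t ih =>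
    simp only [List.foldl_cons, List.length_cons]
    rw [ih (a * 10 + mapD d), ih (0 * 10 + mapD d)]
    ring

lemma toDigitsCore_eq (f : Nat) : ∀ (n : Nat) (acc : List Char), 0 < n → n < 10 ^ f →
    Nat.toDigitsCore 10 f n acc = ((Nat.digits 10 n).map Nat.digitChar).reverse ++ acc := by
  induction f with
  | zero => intro n acc hn hf; omega
  | succ f ih =>
    intro n acc hn hf
    rw [Nat.toDigitsCore]
    by_cases h0 : n / 10 = 0
    · have hlt : n < 10 := by omega
      rw [Nat.digits_def' (by norm_num : 1 < 10) hn, h0]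
      simp
    · have hpos : 0 < n / 10 := Nat.pos_of_ne_zero h0
      have hbound : n / 10 < 10 ^ f := by
        rw [pow_succ] at hf; omega
      simp only [h0, if_false]
      rw [ih (n / 10) _ hpos hbound, Nat.digits_def' (by norm_num : 1 < 10) hn]
      simp

lemma toDigits_eq (n : Nat) (hn : 0 < n) :
    Nat.toDigits 10 n = ((Nat.digits 10 n).map Nat.digitChar).reverse := by
  have h : n < 10 ^ (n + 1) := by
    calc n < 2 ^ n := Nat.lt_pow_self (by norm_num)
    _ ≤ 10 ^ n := Nat.pow_le_pow_left (by norm_num) n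
    _ ≤ 10 ^ (n + 1) := Nat.pow_le_pow_right (by norm_num) (Nat.le_succ n)
  simpa using toDigitsCore_eq (n + 1) n [] hn h

lemma toChars_pos (n : Nat) (hn : 0 < n) :
    PySem.Int.toChars ((n : Nat) : Int) = ((Nat.digits 10 n).map Nat.digitChar).reverse := by
  simp only [PySem.Int.toChars]
  rw [if_neg (by omega), Int.toNat_natCast, toDigits_eq n hn]

lemma mod10_natCast (m : Nat) : PySem.Int.mod ((m : Nat) : Int) 10 = ((m % 10 : Nat) : Int) := by
  exact_mod_cast PySem.Int.mod_natCast m 10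

lemma floordiv10_natCast (m : Nat) :
    PySem.Int.floordiv ((m : Nat) : Int) 10 = ((m / 10 : Nat) : Int) := by
  exact_mod_cast PySem.Int.floordiv_natCast m 10

-- the loop of A computes: 0 on the first forbidden digit, else ret + the Horner value of the digits
lemma upsideLoop_eq (n : Nat) : ∀ (ret : Int), 0 < n →
    upsideLoop ((n : Nat) : Int) ret (((Nat.digits 10 n).length : Int) - 1)
      = if (Nat.digits 10 n).any (fun d => decide (mapD d = -1)) then 0
        else ret + (Nat.digits 10 n).foldl (fun x d => x * 10 + mapD d) 0 := by
  induction n using Nat.strong_induction_on with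
  | _ n ih =>
    intro ret hn
    have hd : Nat.digits 10 n = n % 10 :: Nat.digits 10 (n / 10) :=
      Nat.digits_def' (by norm_num : 1 < 10) hn
    rw [upsideLoop, dif_pos (by exact_mod_cast hn), mod10_natCast,
      pyGet?_pairA (n % 10) (Nat.mod_lt n (by norm_num))]
    dsimp only
    by_cases hbad : mapD (n % 10) = -1
    · simp [hd, hbad]
    · rw [if_neg hbad, floordiv10_natCast]
      by_cases h0 : n / 10 = 0
      · have hlen : (Nat.digits 10 n).length = 1 := by rw [hd, h0]; simp
        rw [hlen, h0]
        rw [upsideLoop, dif_neg (by norm_num)]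
        simp [hd, h0, hbad]
      · have hpos : 0 < n / 10 := Nat.pos_of_ne_zero h0
        have hlen : (Nat.digits 10 n).length = (Nat.digits 10 (n / 10)).length + 1 := by
          rw [hd]; simp
        have hdeg : (((Nat.digits 10 n).length : Int) - 1) - 1
            = ((Nat.digits 10 (n / 10)).length : Int) - 1 := by rw [hlen]; push_cast; ring
        have hpow : ((((Nat.digits 10 n).length : Int) - 1)).toNat
            = (Nat.digits 10 (n / 10)).length := by rw [hlen]; omega
        rw [hpow, hdeg, ih (n / 10) (Nat.div_lt_self hn (by norm_num)) _ hpos]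
        rw [hd]
        by_cases hrest : (Nat.digits 10 (n / 10)).any (fun d => decide (mapD d = -1))
        · simp [hrest, hbad]
        · simp only [List.any_cons, hrest, hbad, decide_false,
            Bool.false_or, List.foldl_cons]
          rw [foldl_horner_shift _ (0 * 10 + mapD (n % 10))]
          ring_nf

lemma b_pos_eq (n : Nat) (hn : 0 < n) :
    upside_down_alt ((n : Nat) : Int)
      = if (Nat.digits 10 n).any (fun d => decide (mapD d = -1)) then 0
        else (Nat.digits 10 n).foldl (fun x d => x * 10 + mapD d) 0 := by
  unfold upside_down_alt
  rw [PySem.Int.toList_toStr, toChars_pos n hn]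
  simp only [List.any_reverse, List.any_map, List.reverse_reverse, List.foldl_map]
  have hany : (Nat.digits 10 n).any ((fun c => !udMapping.contains c) ∘ Nat.digitChar)
      = (Nat.digits 10 n).any (fun d => decide (mapD d = -1)) :=
    any_congr_mem _ _ _ (fun d hdm => contains_digitChar d (Nat.digits_lt_base (by norm_num) hdm))
  rw [hany]
  by_cases hbad : (Nat.digits 10 n).any (fun d => decide (mapD d = -1))
  · simp [hbad]
  · rw [if_neg (by simp [hbad]), if_neg (by simp [hbad])]
    refine PySem.List.foldl_congr_mem _ _ _ _ ?_
    intro acc d hdm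
    have hlt : d < 10 := Nat.digits_lt_base (by norm_num) hdm
    have hv : mapD d ≠ -1 := by
      intro hcontra
      exact hbad (List.any_eq_true.mpr ⟨d, hdm, by show decide (mapD d = -1) = true; rw [hcontra]; rfl⟩)
    rw [getD_digitChar d hlt hv]

lemma a_pos_eq (n : Nat) (hn : 0 < n) :
    upside_down ((n : Nat) : Int)
      = upsideLoop ((n : Nat) : Int) 0 (((Nat.digits 10 n).length : Int) - 1) := by
  unfold upside_down
  congr 1
  simp only [PySem.Str.len, PySem.Int.toList_toStr, toChars_pos n hn]
  simp

-- ===== VERDICT (by name: the statement is the Claim_ definition above) =====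
theorem upside_down_spec : Claim_equal_upside_down := by
  intro num _
  unfold Spec_upside_down
  cases num with
  | negSucc m =>
    -- negative input: A's loop never runs (ret = 0); B rejects the '-' character
    unfold upside_down
    rw [upsideLoop, dif_neg (not_lt.mpr (le_of_lt (Int.negSucc_lt_zero m)))]
    unfold upside_down_alt
    rw [PySem.Int.toList_toStr]
    have hneg : PySem.Int.toChars (Int.negSucc m)
        = '-' :: Nat.toDigits 10 (Int.negSucc m).natAbs := by
      simp [PySem.Int.toChars, Int.negSucc_lt_zero]
    rw [hneg]
    simp [List.any_cons, show udMapping.contains '-' = false by decide]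
  | ofNat k =>
    cases k with
    | zero =>
      have hb : upside_down_alt (Int.ofNat 0) = 0 := by
        unfold upside_down_alt
        rw [PySem.Int.toList_toStr]
        decide
      unfold upside_down
      rw [upsideLoop, dif_neg (by norm_num), hb]
    | succ n =>
      have hn : 0 < n + 1 := Nat.succ_pos n
      have hcast : (Int.ofNat (n + 1)) = (((n + 1 : Nat) : Nat) : Int) := rfl
      rw [hcast, a_pos_eq (n + 1) hn, upsideLoop_eq (n + 1) 0 hn, b_pos_eq (n + 1) hn]
      simp
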